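-- pv_equiv track=rewrite | github.com/cube-lover/astrbot_qzone_auto_like | qzone_comment.py | _extract_cookie_value
-- ===== SOURCE A (Python) =====
-- def _extract_cookie_value(cookie: str, key: str) -> str:
--     if not cookie:
--         return ""
--     for item in cookie.split(";"):
--         item = item.strip()
--         if item.startswith(key + "="):
--             return item.split("=", 1)[1]
--     return ""
-- ===== SOURCE B (Python) =====
-- def _extract_cookie_value(cookie: str, key: str) -> str:
--     cookies = {}
--     for piece in cookie.split(";"):
--         parts = piece.strip().split("=", 1)
--         if len(parts) == 2:
--             cookies.setdefault(parts[0], parts[1])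
--     return cookies.get(key, "")
-- ===== Notes on version B (the rewrite author's own statement) =====
-- stated objective: idiomatic
-- what changed: A's early-return prefix-match scan over the pieces is replaced by parsing the whole cookie string once into a first-occurrence-wins dict (setdefault) and then a single lookup.
-- outside the precondition, e.g. on _extract_cookie_value('a=b=c', 'a=b'): A returns 'b=c', B returns ''
import Mathlib
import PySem

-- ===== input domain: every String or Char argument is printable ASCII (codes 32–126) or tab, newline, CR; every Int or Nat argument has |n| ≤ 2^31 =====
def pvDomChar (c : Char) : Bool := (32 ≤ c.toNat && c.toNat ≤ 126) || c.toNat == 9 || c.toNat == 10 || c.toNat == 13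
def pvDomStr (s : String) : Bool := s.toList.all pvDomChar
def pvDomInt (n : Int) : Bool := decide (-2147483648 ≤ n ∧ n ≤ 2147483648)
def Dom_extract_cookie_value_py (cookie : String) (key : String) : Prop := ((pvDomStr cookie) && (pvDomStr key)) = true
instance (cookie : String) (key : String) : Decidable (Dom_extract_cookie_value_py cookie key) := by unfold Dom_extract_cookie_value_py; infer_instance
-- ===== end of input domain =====

-- B replaces A's early-return prefix-match scan by a parse-everything-into-a-dict pass plus one lookup (idiomatic, same cost).

-- ===== PORT A =====
-- 'for item in cookie.split(";")' with early return; 'item.split("=", 1)[1]' is the second piece of the maxsplit-1 split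
def extractLoopA (ks : List Char) : List (List Char) → List Char
  | [] => []
  | p :: rest =>
    let it := PySem.Chars.strip p
    if PySem.Chars.startswith it (ks ++ ['=']) then
      match PySem.Chars.splitOnMax it ['='] 1 with
      | _ :: v :: _ => v
      | _ => []   -- index [1]: unreachable, the startswith guard guarantees a '=' in it
    else extractLoopA ks rest

def extract_cookie_value_py (cookie : String) (key : String) : String :=
  if cookie.toList = [] then ""
  else String.ofList (extractLoopA key.toList (PySem.Chars.splitOn cookie.toList [';']))

-- ===== PORT B =====
-- build the dict in one pass (setdefault: first occurrence wins), then one .get(key, "")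
def extractLoopB (d : PySem.Dict (List Char) (List Char)) : List (List Char) → PySem.Dict (List Char) (List Char)
  | [] => d
  | p :: rest =>
    match PySem.Chars.splitOnMax (PySem.Chars.strip p) ['='] 1 with
    | [k, v] => extractLoopB (d.setdefault k v) rest
    | _ => extractLoopB d rest

def extract_cookie_value_py_alt (cookie : String) (key : String) : String :=
  String.ofList
    ((extractLoopB PySem.Dict.empty (PySem.Chars.splitOn cookie.toList [';'])).getD key.toList [])

-- ===== PRECONDITION & SPEC =====
-- Pre_ excludes keys that contain '=' AND whose text 'key=' occurs in the cookie string (no real cookie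
-- key contains '='): there A's prefix match can treat a '=' inside the key as the separator and return a
-- suffix of a value, while B's parsed dict never holds a key with '='; both behaviours are defensible on
-- that unspecifiable corner.
def Pre_extract_cookie_value_py (cookie : String) (key : String) : Prop :=
  '=' ∉ key.toList ∨ PySem.Chars.isIn (key.toList ++ ['=']) cookie.toList = false

instance (cookie : String) (key : String) : Decidable (Pre_extract_cookie_value_py cookie key) := by
  unfold Pre_extract_cookie_value_py; infer_instance

def pvWitness_extract_cookie_value_py : String × String := ("uin=o123; skey=@abc; skey=zzz", "skey")

def Spec_extract_cookie_value_py (cookie : String) (key : String) (out : String) : Prop := out = extract_cookie_value_py_alt cookie key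
instance (cookie : String) (key : String) (out : String) : Decidable (Spec_extract_cookie_value_py cookie key out) := by unfold Spec_extract_cookie_value_py; infer_instance

-- ===== CLAIM (what is proved, stated in full; the proofs are below) =====
def Claim_equal_extract_cookie_value_py : Prop := ∀ (cookie : String) (key : String), Dom_extract_cookie_value_py cookie key → Pre_extract_cookie_value_py cookie key → Spec_extract_cookie_value_py cookie key (extract_cookie_value_py cookie key)

-- ===== LEMMAS AND PROOFS =====

-- splitOnMax.go with the split budget already exhausted returns the rest as one last piece
theorem pv_go_zero (fuel : Nat) (l cur : List Char) (acc : List (List Char)) :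
    PySem.Chars.splitOnMax.go ['='] fuel 0 l cur acc = ((cur.reverse ++ l) :: acc).reverse := by
  cases fuel with
  | zero => simp [PySem.Chars.splitOnMax.go]
  | succ f => cases l with
    | nil => simp [PySem.Chars.splitOnMax.go]
    | cons c rest => simp [PySem.Chars.splitOnMax.go]

theorem pv_go_one (it : List Char) : ∀ (fuel : Nat) (cur : List Char) (acc : List (List Char)),
    it.length ≤ fuel →
    PySem.Chars.splitOnMax.go ['='] (fuel + 1) 1 it cur acc =
      acc.reverse ++
        (if '=' ∈ it then
          [cur.reverse ++ it.takeWhile (· ≠ '='), (it.dropWhile (· ≠ '=')).tail]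
        else [cur.reverse ++ it]) := by
  induction it with
  | nil => intro fuel cur acc _; simp [PySem.Chars.splitOnMax.go]
  | cons c rest ih =>
    intro fuel cur acc hf
    cases fuel with
    | zero => simp at hf
    | succ f =>
      by_cases hc : c = '='
      · subst hc
        simp [PySem.Chars.splitOnMax.go, List.isPrefixOf, pv_go_zero]
      · have h1 : List.isPrefixOf ['='] (c :: rest) = false := by
          simp [List.isPrefixOf]; exact fun h => hc h.symm
        have hr : rest.length ≤ f := by simpa using hf
        simp only [PySem.Chars.splitOnMax.go]
        simp only [h1, if_neg (by omega : ¬(1 : Nat) = 0)]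
        rw [ih f (c :: cur) acc hr]
        simp [hc, Ne.symm hc]

-- 'it.split("=", 1)' in closed form: first piece up to the first '=', then the remainder
theorem pv_splitOnMax_one (it : List Char) :
    PySem.Chars.splitOnMax it ['='] 1 =
      if '=' ∈ it then [it.takeWhile (· ≠ '='), (it.dropWhile (· ≠ '=')).tail]
      else [it] := by
  have h := pv_go_one it it.length [] [] (le_refl _)
  simp only [PySem.Chars.splitOnMax, if_neg (by omega : ¬(1:Int) < 0)]
  simpa using h

theorem pv_dropWhile_head_false {p : Char → Bool} :
    ∀ (it : List Char) {c : Char} {cs : List Char},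
      List.dropWhile p it = c :: cs → p c = false := by
  intro it
  induction it with
  | nil => intro c cs h; simp at h
  | cons a l ih =>
    intro c cs h
    by_cases hpa : p a
    · rw [List.dropWhile_cons_of_pos hpa] at h; exact ih h
    · rw [List.dropWhile_cons_of_neg hpa] at h
      obtain ⟨rfl, -⟩ := List.cons.inj h
      simpa using hpa

-- A's guard 'item.startswith(key + "=")' holds iff the piece has a '=' and the part before it is the key
theorem pv_prefix_iff (it ks : List Char) (hk : '=' ∉ ks) :
    PySem.Chars.startswith it (ks ++ ['=']) = true ↔
      ('=' ∈ it ∧ it.takeWhile (· ≠ '=') = ks) := by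
  have hks : List.takeWhile (fun x => decide (x ≠ '=')) ks = ks :=
    List.takeWhile_eq_self_iff.mpr (by
      intro x hx
      simp only [decide_eq_true_eq]
      exact fun h => hk (h ▸ hx))
  rw [PySem.Chars.startswith_iff]
  constructor
  · rintro ⟨t, rfl⟩
    refine ⟨by simp, ?_⟩
    rw [List.append_assoc, List.takeWhile_append]
    simp only [ne_eq] at hks ⊢
    rw [hks]
    simp
  · rintro ⟨hm, htw⟩
    have hsplit : it.takeWhile (· ≠ '=') ++ it.dropWhile (· ≠ '=') = it :=
      List.takeWhile_append_dropWhile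
    have hne : it.dropWhile (· ≠ '=') ≠ [] := by
      intro h
      have := List.dropWhile_eq_nil_iff.mp h '=' hm
      simp at this
    obtain ⟨c, cs, hcons⟩ := List.exists_cons_of_ne_nil hne
    have hc : c = '=' := by
      have := pv_dropWhile_head_false it hcons
      simpa using this
    refine ⟨cs, ?_⟩
    rw [← hsplit, htw, hcons, hc]
    simp

-- the dict lookup after B's loop equals A's first-match scan (relative to what is already in the dict)
theorem pv_loop (ks : List Char) (hk : '=' ∉ ks) :
    ∀ (pieces : List (List Char)) (d : PySem.Dict (List Char) (List Char)),
      (extractLoopB d pieces).getD ks [] =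
        if d.contains ks then d.getD ks [] else extractLoopA ks pieces := by
  intro pieces
  induction pieces with
  | nil =>
    intro d
    by_cases h : d.contains ks
    · simp [extractLoopB, h]
    · simp [extractLoopB, extractLoopA, h, PySem.Dict.getD_of_not_contains _ _ (by simpa using h)]
  | cons p rest ih =>
    intro d
    by_cases he : '=' ∈ PySem.Chars.strip p
    · have hparts := pv_splitOnMax_one (PySem.Chars.strip p)
      rw [if_pos he] at hparts
      by_cases hkeq : (PySem.Chars.strip p).takeWhile (· ≠ '=') = ks
      · -- matching piece
        have hsw : PySem.Chars.startswith (PySem.Chars.strip p) (ks ++ ['=']) = true :=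
          (pv_prefix_iff _ ks hk).mpr ⟨he, hkeq⟩
        rw [extractLoopB, hparts, extractLoopA]
        simp only [hsw, if_true, hparts, hkeq]
        rw [ih]
        by_cases hc : d.contains ks
        · rw [if_pos (by simp [PySem.Dict.contains_setdefault, hc]),
              PySem.Dict.setdefault_of_contains _ _ hc, if_pos hc]
        · rw [if_pos (by simp [PySem.Dict.contains_setdefault]),
              PySem.Dict.getD_setdefault_self, if_neg hc,
              PySem.Dict.getD_of_not_contains _ _ (by simpa using hc)]
      · -- a piece for a different key
        have hsw : PySem.Chars.startswith (PySem.Chars.strip p) (ks ++ ['=']) = false := by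
          rw [← Bool.not_eq_true, pv_prefix_iff _ ks hk]
          exact fun h => hkeq h.2
        rw [extractLoopB, hparts, extractLoopA]
        simp only [hsw, Bool.false_eq_true, if_false]
        rw [ih]
        have hcs : (d.setdefault ((PySem.Chars.strip p).takeWhile (· ≠ '=')) ((PySem.Chars.strip p).dropWhile (· ≠ '=')).tail).contains ks = d.contains ks := by
          rw [PySem.Dict.contains_setdefault]
          have hb : (ks == (PySem.Chars.strip p).takeWhile (· ≠ '=')) = false :=
            beq_eq_false_iff_ne.mpr (fun h => hkeq h.symm)
          rw [hb, Bool.false_or]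
        rw [hcs]
        by_cases hc : d.contains ks
        · rw [if_pos hc, if_pos hc]
          rw [PySem.Dict.getD_eq_get?_getD, PySem.Dict.getD_eq_get?_getD,
              PySem.Dict.get?_setdefault_of_ne _ _ (fun h => hkeq h.symm)]
        · rw [if_neg hc, if_neg hc]
    · -- piece without '='
      have hparts := pv_splitOnMax_one (PySem.Chars.strip p)
      rw [if_neg he] at hparts
      have hsw : PySem.Chars.startswith (PySem.Chars.strip p) (ks ++ ['=']) = false := by
        rw [← Bool.not_eq_true, pv_prefix_iff _ ks hk]
        exact fun h => he h.1
      rw [extractLoopB, hparts, extractLoopA]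
      simp only [hsw, Bool.false_eq_true, if_false]
      exact ih d

-- every piece produced by the fueled split(";") loop is in the accumulator or a substring of the input
theorem pv_splitOn_go_infix (sep : List Char) :
    ∀ (fuel : Nat) (l cur : List Char) (acc : List (List Char)) (x : List Char),
      x ∈ PySem.Chars.splitOn.go sep fuel l cur acc →
        x ∈ acc ∨ x <:+: (cur.reverse ++ l) := by
  intro fuel
  induction fuel with
  | zero =>
    intro l cur acc x hx
    simp [PySem.Chars.splitOn.go] at hx
    rcases hx with h | h
    · left; exact h
    · right; rw [h]
  | succ f ih =>
    intro l cur acc x hx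
    cases l with
    | nil =>
      simp [PySem.Chars.splitOn.go] at hx
      rcases hx with h | h
      · left; exact h
      · right; rw [h]; simp
    | cons c rest =>
      by_cases hp : sep.isPrefixOf (c :: rest)
      · rw [show PySem.Chars.splitOn.go sep (f+1) (c :: rest) cur acc
            = PySem.Chars.splitOn.go sep f (List.drop sep.length (c :: rest)) [] (cur.reverse :: acc)
            from by simp [PySem.Chars.splitOn.go, hp]] at hx
        rcases ih _ [] _ x hx with h | h
        · rcases List.mem_cons.mp h with h | h
          · right; rw [h]; exact (List.prefix_append _ _).isInfix
          · left; exact h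
        · right
          simp only [List.reverse_nil, List.nil_append] at h
          exact h.trans ((List.drop_suffix _ _).trans (List.suffix_append _ _)).isInfix
      · rw [show PySem.Chars.splitOn.go sep (f+1) (c :: rest) cur acc
            = PySem.Chars.splitOn.go sep f rest (c :: cur) acc
            from by simp [PySem.Chars.splitOn.go, hp]] at hx
        rcases ih _ _ _ x hx with h | h
        · left; exact h
        · right
          simpa [List.append_assoc] using h

theorem pv_mem_splitOn_infix (s : List Char) (p : List Char)
    (hp : p ∈ PySem.Chars.splitOn s [';']) : p <:+: s := by
  have := pv_splitOn_go_infix [';'] (s.length + 1) s [] [] p (by simpa [PySem.Chars.splitOn] using hp)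
  simpa using this

theorem pv_strip_infix (p : List Char) : PySem.Chars.strip p <:+: p := by
  have h1 : PySem.Chars.lstrip p <:+ p := List.dropWhile_suffix _
  have h2 : PySem.Chars.rstrip (PySem.Chars.lstrip p) <+: PySem.Chars.lstrip p := by
    rw [PySem.Chars.rstrip, ← List.reverse_reverse (PySem.Chars.lstrip p)]
    exact List.reverse_prefix.mpr
      (by simpa using List.dropWhile_suffix (l := (PySem.Chars.lstrip p).reverse) PySem.Chars.isspace)
  exact (h2.isInfix).trans h1.isInfix

-- a key containing '=' is never a key of B's parsed dict
theorem pv_bloop_notfound (ks : List Char) (hk : '=' ∈ ks) :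
    ∀ (pieces : List (List Char)) (d : PySem.Dict (List Char) (List Char)),
      d.get? ks = none → (extractLoopB d pieces).get? ks = none := by
  intro pieces
  induction pieces with
  | nil => intro d hd; simpa [extractLoopB] using hd
  | cons p rest ih =>
    intro d hd
    have hparts := pv_splitOnMax_one (PySem.Chars.strip p)
    by_cases he : '=' ∈ PySem.Chars.strip p
    · rw [if_pos he] at hparts
      rw [extractLoopB, hparts]
      refine ih _ ?_
      rw [PySem.Dict.get?_setdefault_of_ne _ _ ?_, hd]
      intro heq
      have := List.mem_takeWhile_imp (heq ▸ hk)
      simp at this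
    · rw [if_neg he] at hparts
      rw [extractLoopB, hparts]
      exact ih d hd

-- if 'key=' occurs nowhere in the string, A's scan never fires
theorem pv_aloop_nil (ks s : List Char) (hni : ¬ (ks ++ ['=']) <:+: s) :
    ∀ (pieces : List (List Char)), (∀ p ∈ pieces, p <:+: s) → extractLoopA ks pieces = [] := by
  intro pieces
  induction pieces with
  | nil => intro _; rfl
  | cons p rest ih =>
    intro hall
    have hsw : PySem.Chars.startswith (PySem.Chars.strip p) (ks ++ ['=']) = false := by
      rw [← Bool.not_eq_true, PySem.Chars.startswith_iff]
      intro hpre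
      exact hni (hpre.isInfix.trans ((pv_strip_infix p).trans (hall p (by simp))))
    rw [extractLoopA]
    simp only [hsw, Bool.false_eq_true, if_false]
    exact ih (fun q hq => hall q (by simp [hq]))

-- ===== VERDICT (by name: the statement is the Claim_ definition above) =====
theorem extract_cookie_value_py_spec : Claim_equal_extract_cookie_value_py := by
  intro cookie key _ hpre
  unfold Spec_extract_cookie_value_py extract_cookie_value_py extract_cookie_value_py_alt
  by_cases hk : '=' ∈ key.toList
  case pos =>
    -- the excluded-key shape: 'key=' does not occur in the cookie, both sides return ""
    have hni : ¬ (key.toList ++ ['=']) <:+: cookie.toList := by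
      rcases hpre with h | h
      · exact absurd hk h
      · exact (PySem.Chars.isIn_eq_false_iff _ _).mp h
    have hB : (extractLoopB PySem.Dict.empty (PySem.Chars.splitOn cookie.toList [';'])).get? key.toList = none :=
      pv_bloop_notfound key.toList hk _ _ (PySem.Dict.get?_empty _)
    have hA : extractLoopA key.toList (PySem.Chars.splitOn cookie.toList [';']) = [] :=
      pv_aloop_nil key.toList cookie.toList hni _
        (fun p hp => pv_mem_splitOn_infix cookie.toList p hp)
    rw [PySem.Dict.getD_eq_get?_getD, hB]
    by_cases hemp : cookie.toList = []
    · rw [if_pos hemp]; rfl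
    · rw [if_neg hemp, hA]; rfl
  case neg =>
  have hloop := pv_loop key.toList hk (PySem.Chars.splitOn cookie.toList [';']) PySem.Dict.empty
  rw [if_neg (by simp [PySem.Dict.contains_empty])] at hloop
  by_cases hemp : cookie.toList = []
  · rw [if_pos hemp, hloop, hemp]
    have h0 : extractLoopA key.toList (PySem.Chars.splitOn [] [';']) = [] := by
      have h1 : PySem.Chars.splitOn ([] : List Char) [';'] = [[]] := rfl
      have hsw : PySem.Chars.startswith (PySem.Chars.strip []) (key.toList ++ ['=']) = false := by
        rw [← Bool.not_eq_true, PySem.Chars.startswith_iff]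
        intro hp
        have h2 := List.eq_nil_of_prefix_nil hp
        simp at h2
      rw [h1, extractLoopA]
      simp [hsw, extractLoopA]
    rw [h0]
  · rw [if_neg hemp, hloop]
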